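-- pv_equiv track=rewrite | github.com/ninepig/leecode_dd_2024 | zmianjing/dd/DDprac/restaurantName.py | findSimilarNameWithOneChange
-- ===== SOURCE A (Python) =====
-- import collections
--
-- def findSimilarNameWithOneChange(resName:str, candidates:list[str])->list[str]:
--     name_counter = collections.Counter(resName)
--     res = []
--     for candidate in candidates:
--         diff = 0
--         candidate_counter = collections.Counter(candidate)
--         if candidate_counter != name_counter:
--             continue
--         for i in range(len(resName)):
--             if resName[i] != candidate[i]:
--                 diff += 1
--             if diff > 2: ## missing this step, can boost up
--                 break
--         if diff == 0 or diff == 2: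
--            res.append(candidate)
--
--     return res
-- ===== SOURCE B (Python) =====
-- def findSimilarNameWithOneChange(resName: str, candidates: list[str]) -> list[str]:
--     res = []
--     for cand in candidates:
--         if len(cand) != len(resName):
--             continue
--         diffs = [(a, b) for a, b in zip(resName, cand) if a != b]
--         if not diffs:
--             res.append(cand)
--         elif len(diffs) == 2 and diffs[0] == diffs[1][::-1]:
--             res.append(cand)
--     return res
-- ===== Notes on version B (the rewrite author's own statement) =====
-- stated objective: simpler
-- what changed: B drops the collections.Counter multiset comparison and the capped positional-diff counter entirely: it keeps only same-length candidates and collects the mismatched character pairs, accepting a candidate iff there are none or exactly two forming a genuine transposition.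
import Mathlib
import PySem

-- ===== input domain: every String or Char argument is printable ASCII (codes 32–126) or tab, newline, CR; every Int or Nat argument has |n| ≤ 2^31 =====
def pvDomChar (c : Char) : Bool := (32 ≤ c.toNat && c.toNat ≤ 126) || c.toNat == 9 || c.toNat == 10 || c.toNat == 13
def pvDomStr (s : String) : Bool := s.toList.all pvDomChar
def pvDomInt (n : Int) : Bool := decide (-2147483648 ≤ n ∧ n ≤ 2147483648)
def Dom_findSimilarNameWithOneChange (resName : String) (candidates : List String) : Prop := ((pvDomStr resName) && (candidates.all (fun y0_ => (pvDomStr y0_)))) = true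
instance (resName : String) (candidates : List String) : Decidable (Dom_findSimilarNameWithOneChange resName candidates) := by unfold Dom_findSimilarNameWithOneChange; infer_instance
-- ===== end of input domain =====

-- B drops the Counter (multiset) comparison entirely and instead detects a genuine
-- transposition directly on the differing positions of same-length candidates (objective: simpler).

-- ===== PORT A =====
-- Python's Counter equality compares the counts as maps, ignoring insertion order
-- (counts built from a string are never zero, so dict-as-map equality is exact).
def pvCounterEq (d1 d2 : PySem.Dict Char Int) : Bool :=
  d1.keys.all (fun k => d2.getD k 0 == d1.getD k 0) &&
  d2.keys.all (fun k => d1.getD k 0 == d2.getD k 0)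

-- the inner 'for i in range(len(resName))' with its 'diff > 2' break; candidate[i] is
-- read with getD, exact here because the loop is only reached when the two Counters are
-- equal, hence the lengths are equal and every index is in range for both strings
def pvDiffLoop (s c : List Char) : List Nat → Int → Int
  | [], diff => diff
  | i :: rest, diff =>
    let diff' := if s.getD i ' ' ≠ c.getD i ' ' then diff + 1 else diff
    if diff' > 2 then diff' else pvDiffLoop s c rest diff'

def findSimilarNameWithOneChange (resName : String) (candidates : List String) : List String :=
  let nameCounter := PySem.Dict.counter resName.toList
  candidates.foldl (fun res candidate =>
    if !(pvCounterEq (PySem.Dict.counter candidate.toList) nameCounter) then res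
    else
      let diff := pvDiffLoop resName.toList candidate.toList (List.range resName.toList.length) 0
      if diff = 0 ∨ diff = 2 then res ++ [candidate] else res) []

-- ===== PORT B =====
def findSimilarNameWithOneChange_alt (resName : String) (candidates : List String) : List String :=
  candidates.foldl (fun res cand =>
    if cand.toList.length ≠ resName.toList.length then res
    else
      match (resName.toList.zip cand.toList).filter (fun p => p.1 ≠ p.2) with
      | [] => res ++ [cand]
      | [(a, b), (x, y)] => if a = y ∧ b = x then res ++ [cand] else res
      | _ => res) []

-- ===== PRECONDITION & SPEC =====
def Spec_findSimilarNameWithOneChange (resName : String) (candidates : List String) (out : List String) : Prop := out = findSimilarNameWithOneChange_alt resName candidates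
instance (resName : String) (candidates : List String) (out : List String) : Decidable (Spec_findSimilarNameWithOneChange resName candidates out) := by unfold Spec_findSimilarNameWithOneChange; infer_instance

-- ===== CLAIM (what is proved, stated in full; the proofs are below) =====
def Claim_equal_findSimilarNameWithOneChange : Prop := ∀ (resName : String) (candidates : List String), Dom_findSimilarNameWithOneChange resName candidates → Spec_findSimilarNameWithOneChange resName candidates (findSimilarNameWithOneChange resName candidates)

-- ===== LEMMAS AND PROOFS =====

-- Counter equality is exactly count agreement, i.e. a permutation
lemma counterEq_iff_perm (c s : List Char) :
    pvCounterEq (PySem.Dict.counter c) (PySem.Dict.counter s) = true ↔ c.Perm s := by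
  rw [List.perm_iff_count]
  unfold pvCounterEq
  rw [Bool.and_eq_true, List.all_eq_true, List.all_eq_true]
  simp only [PySem.Dict.keys_counter, PySem.Set.mem_ofList, PySem.Dict.getD_counter, beq_iff_eq]
  constructor
  · rintro ⟨h1, h2⟩ ch
    by_cases hc : ch ∈ c
    · exact_mod_cast (h1 ch hc).symm
    · by_cases hs : ch ∈ s
      · exact_mod_cast h2 ch hs
      · rw [List.count_eq_zero_of_not_mem hc, List.count_eq_zero_of_not_mem hs]
  · intro h
    refine ⟨fun ch _ => ?_, fun ch _ => ?_⟩
    · exact_mod_cast (h ch).symm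
    · exact_mod_cast h ch

-- the break-loop, rephrased over the zipped lists
def pvZl : List (Char × Char) → Int → Int
  | [], d => d
  | (a, b) :: t, d =>
    let d' := if a ≠ b then d + 1 else d
    if d' > 2 then d' else pvZl t d'

lemma pvDiffLoop_shift (s c : List Char) (a b : Char) (idxs : List Nat) (d : Int) :
    pvDiffLoop (a :: s) (b :: c) (idxs.map Nat.succ) d = pvDiffLoop s c idxs d := by
  induction idxs generalizing d with
  | nil => rfl
  | cons i rest ih =>
    simp only [List.map_cons, pvDiffLoop, List.getD_cons_succ]
    split <;> split <;> first | rfl | exact ih _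

lemma pvDiffLoop_eq_zl (s : List Char) : ∀ (c : List Char), s.length = c.length → ∀ d : Int,
    pvDiffLoop s c (List.range s.length) d = pvZl (s.zip c) d := by
  induction s with
  | nil => intro c h d; rw [List.length_nil, List.eq_nil_of_length_eq_zero h.symm]; rfl
  | cons a s ih =>
    intro c h d
    cases c with
    | nil => simp at h
    | cons b c =>
      rw [List.length_cons, List.range_succ_eq_map]
      simp only [pvDiffLoop, List.getD_cons_zero, List.zip_cons_cons, pvZl]
      split <;> split <;>
        first
        | rfl
        | (rw [pvDiffLoop_shift]; exact ih c (by simpa using h) _)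

lemma pvZl_eq_min (l : List (Char × Char)) : ∀ d : Int, 0 ≤ d → d ≤ 2 →
    pvZl l d = min (d + ((l.filter (fun p => p.1 ≠ p.2)).length : Int)) 3 := by
  induction l with
  | nil => intro d h0 h2; simp [pvZl]; omega
  | cons p t ih =>
    intro d h0 h2
    obtain ⟨a, b⟩ := p
    rw [List.filter_cons]
    by_cases hab : a = b
    · simpa [pvZl, hab, show ¬ d > 2 by omega] using ih d h0 h2
    · by_cases hd : d = 2
      · subst hd
        have hlen : (0:Int) ≤ ((t.filter (fun p => p.1 ≠ p.2)).length : Int) := by positivity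
        simp only [pvZl, hab, ne_eq, not_false_eq_true, if_true, show (2:Int) + 1 > 2 by omega,
          decide_true, if_pos, List.length_cons]
        push_cast
        omega
      · have hih := ih (d + 1) (by omega) (by omega)
        simp only [pvZl, hab, ne_eq, not_false_eq_true, if_true, show ¬ d + 1 > 2 by omega,
          if_false, hih, decide_true, List.length_cons]
        push_cast
        omega

-- a permutation of same-length strings is a permutation of their mismatched positions
lemma perm_iff_mismatch (s c : List Char) (h : s.length = c.length) :
    c.Perm s ↔
      (((s.zip c).filter (fun p => p.1 ≠ p.2)).map Prod.snd).Perm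
        (((s.zip c).filter (fun p => p.1 ≠ p.2)).map Prod.fst) := by
  have hfst : (s.zip c).map Prod.fst = s := List.map_fst_zip h.le
  have hsnd : (s.zip c).map Prod.snd = c := List.map_snd_zip h.ge
  have hperm := List.filter_append_perm (fun p => decide (p.1 ≠ p.2)) (s.zip c)
  have heq : ((s.zip c).filter (fun p => !decide (p.1 ≠ p.2))).map Prod.snd
      = ((s.zip c).filter (fun p => !decide (p.1 ≠ p.2))).map Prod.fst := by
    refine List.map_congr_left fun p hp => ?_
    have := (List.mem_filter.1 hp).2
    simp only [Bool.not_eq_true', decide_eq_false_iff_not, not_not] at this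
    exact this.symm
  have h1 := (hperm.map Prod.snd).symm
  rw [List.map_append, hsnd] at h1
  have h2 := (hperm.map Prod.fst).symm
  rw [List.map_append, hfst] at h2
  rw [heq] at h1
  constructor
  · intro hcs
    exact (List.perm_append_right_iff _).1 ((h1.symm.trans hcs).trans h2)
  · intro hmm
    exact h1.trans ((hmm.append_right _).trans h2.symm)

-- perm of two-element mismatch lists is exactly a transposition
lemma perm_pair_iff (a b x y : Char) (hab : a ≠ b) (hxy : x ≠ y) :
    [b, y].Perm [a, x] ↔ a = y ∧ b = x := by
  constructor
  · intro hp
    have hb : b = a ∨ b = x := by simpa using hp.mem_iff.1 (List.mem_cons_self ..)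
    have hy : y = a ∨ y = x := by
      simpa using hp.mem_iff.1 (by simp : y ∈ [b, y])
    rcases hb with hb | hb
    · exact absurd hb.symm hab
    · rcases hy with hy | hy
      · exact ⟨hy.symm, hb⟩
      · exact absurd hy.symm hxy
  · rintro ⟨rfl, rfl⟩
    exact List.Perm.swap _ _ _

-- per-candidate: A's branch equals B's branch
lemma step_eq (resName cand : String) (res : List String) :
    (if !(pvCounterEq (PySem.Dict.counter cand.toList) (PySem.Dict.counter resName.toList)) then res
     else
       let diff := pvDiffLoop resName.toList cand.toList (List.range resName.toList.length) 0
       if diff = 0 ∨ diff = 2 then res ++ [cand] else res)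
    = (if cand.toList.length ≠ resName.toList.length then res
       else
         match (resName.toList.zip cand.toList).filter (fun p => p.1 ≠ p.2) with
         | [] => res ++ [cand]
         | [(a, b), (x, y)] => if a = y ∧ b = x then res ++ [cand] else res
         | _ => res) := by
  set s := resName.toList with hsdef
  set c := cand.toList with hcdef
  by_cases hlen : c.length = s.length
  · rw [if_neg (show ¬(c.length ≠ s.length) from by simp [hlen])]
    have hloop : pvDiffLoop s c (List.range s.length) 0
        = min (((s.zip c).filter (fun p => p.1 ≠ p.2)).length : Int) 3 := by
      rw [pvDiffLoop_eq_zl s c hlen.symm 0, pvZl_eq_min _ 0 (by norm_num) (by norm_num), zero_add]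
    have hcp : pvCounterEq (PySem.Dict.counter c) (PySem.Dict.counter s) = true ↔
        (((s.zip c).filter (fun p => p.1 ≠ p.2)).map Prod.snd).Perm
          (((s.zip c).filter (fun p => p.1 ≠ p.2)).map Prod.fst) :=
      (counterEq_iff_perm c s).trans (perm_iff_mismatch s c hlen.symm)
    rcases hD : (s.zip c).filter (fun p => p.1 ≠ p.2) with _ | ⟨⟨a, b⟩, _ | ⟨⟨x, y⟩, _ | ⟨p3, t⟩⟩⟩
    · rw [hD] at hloop hcp
      simp only [List.map_nil] at hcp
      rw [hD, hcp.2 List.Perm.nil]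
      norm_num [hloop]
    · rw [hD] at hloop
      rw [hD]
      cases hcts : pvCounterEq (PySem.Dict.counter c) (PySem.Dict.counter s) <;>
        norm_num [hloop, hcts]
    · have hab : a ≠ b := by
        have := (List.mem_filter.1 (hD ▸ List.mem_cons_self ..)).2
        simpa using this
      have hxy : x ≠ y := by
        have hm : ((x, y) : Char × Char) ∈ (s.zip c).filter (fun p => p.1 ≠ p.2) := by
          rw [hD]; simp
        simpa using (List.mem_filter.1 hm).2
      rw [hD] at hloop hcp
      simp only [List.map_cons, List.map_nil] at hcp
      rw [hD]
      by_cases hsw : a = y ∧ b = x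
      · rw [hcp.2 ((perm_pair_iff a b x y hab hxy).2 hsw)]
        norm_num [hloop, hsw.1, hsw.2]
      · have hfalse : pvCounterEq (PySem.Dict.counter c) (PySem.Dict.counter s) = false := by
          rw [← Bool.not_eq_true, hcp]
          exact fun hp => hsw ((perm_pair_iff a b x y hab hxy).1 hp)
        rw [hfalse]
        norm_num [hsw]
    · rw [hD] at hloop
      rw [hD]
      have h3 : pvDiffLoop s c (List.range s.length) 0 = 3 := by
        rw [hloop]
        simp only [List.length_cons]
        push_cast
        omega
      cases hcts : pvCounterEq (PySem.Dict.counter c) (PySem.Dict.counter s) <;>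
        norm_num [h3, hcts]
  · rw [if_pos hlen]
    have : pvCounterEq (PySem.Dict.counter c) (PySem.Dict.counter s) = false := by
      rw [← Bool.not_eq_true]
      intro ht
      exact hlen ((counterEq_iff_perm c s).1 ht).length_eq
    rw [this]
    norm_num

-- ===== VERDICT (by name: the statement is the Claim_ definition above) =====
theorem findSimilarNameWithOneChange_spec : Claim_equal_findSimilarNameWithOneChange := by
  intro resName candidates _
  unfold Spec_findSimilarNameWithOneChange
  simp only [findSimilarNameWithOneChange, findSimilarNameWithOneChange_alt]
  congr 1
  funext res cand
  exact step_eq resName cand res
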